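-- pv_equiv track=rewrite | github.com/milesmackenzie/python_scripts | project_us_births.py | year_births
-- ===== SOURCE A (Python) =====
-- def year_births(input_lst):
--     data = input_lst
--     year = {}
--     for item in data:
--         if item[0] not in year:
--             year[item[0]] = item[4]
--         else:
--             year[item[0]] += item[4]
--
--     return year
-- ===== SOURCE B (Python) =====
-- def year_births(input_lst):
--     order = dict.fromkeys(item[0] for item in input_lst)
--     return {y: sum(item[4] for item in input_lst if item[0] == y) for y in order}
-- ===== Notes on version B (the rewrite author's own statement) =====
-- stated objective: alternative
-- what changed: Replaces the single-pass dict accumulation with a two-phase grouping: first collect the distinct years in first-occurrence order via dict.fromkeys, then compute each year's total with a per-key sum over the list.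
import Mathlib
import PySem

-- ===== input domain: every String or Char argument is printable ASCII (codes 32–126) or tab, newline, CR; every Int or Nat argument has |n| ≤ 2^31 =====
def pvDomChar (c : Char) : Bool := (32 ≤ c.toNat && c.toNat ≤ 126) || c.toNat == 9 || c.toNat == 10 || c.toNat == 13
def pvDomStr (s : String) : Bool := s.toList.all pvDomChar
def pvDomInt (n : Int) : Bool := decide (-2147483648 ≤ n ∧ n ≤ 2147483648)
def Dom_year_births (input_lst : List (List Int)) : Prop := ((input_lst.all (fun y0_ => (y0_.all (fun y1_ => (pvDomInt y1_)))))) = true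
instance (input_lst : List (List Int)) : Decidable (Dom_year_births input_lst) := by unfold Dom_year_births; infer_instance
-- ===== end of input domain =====

-- B replaces A's single-pass dict accumulation by a two-phase grouping: distinct years in
-- first-occurrence order, then a per-year summation pass; same return value on Pre_.

-- ===== PORT A =====
-- Python's item[0] / item[4] raise IndexError on short rows; the 'none' fallback below is
-- unreachable under Pre_year_births (which excludes exactly those inputs).
def yearStepA (year : PySem.Dict Int Int) (item : List Int) : PySem.Dict Int Int :=
  match PySem.List.pyGet? item 0, PySem.List.pyGet? item 4 with
  | some k, some v =>
      if year.contains k = false then year.insert k v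
      else year.insert k (year.getD k 0 + v)
  | _, _ => year

def year_births (input_lst : List (List Int)) : List (Int × Int) :=
  (input_lst.foldl yearStepA PySem.Dict.empty).items

-- ===== PORT B =====
-- item[0] / item[4] under Pre_ (rows of length ≥ 5); default never used there.
def key0 (item : List Int) : Int := PySem.List.pyGetD item 0 0
def val4 (item : List Int) : Int := PySem.List.pyGetD item 4 0

def year_births_alt (input_lst : List (List Int)) : List (Int × Int) :=
  let order := PySem.List.dedup (input_lst.map key0)   -- dict.fromkeys over the generator
  order.map (fun y =>
    (y, ((input_lst.filter (fun item => key0 item == y)).map val4).sum))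

-- ===== PRECONDITION & SPEC =====
-- Pre_ excludes exactly the inputs where Python A raises IndexError: a row shorter than 5.
def Pre_year_births (input_lst : List (List Int)) : Prop :=
  ∀ item ∈ input_lst, 5 ≤ item.length
instance (input_lst : List (List Int)) : Decidable (Pre_year_births input_lst) := by
  unfold Pre_year_births; infer_instance
def pvWitness_year_births : List (List Int) := [[1, 0, 0, 0, 5], [2, 0, 0, 0, 3], [1, 0, 0, 0, 7]]

def Spec_year_births (input_lst : List (List Int)) (out : List (Int × Int)) : Prop := out = year_births_alt input_lst
instance (input_lst : List (List Int)) (out : List (Int × Int)) : Decidable (Spec_year_births input_lst out) := by unfold Spec_year_births; infer_instance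

-- ===== CLAIM (what is proved, stated in full; the proofs are below) =====
def Claim_equal_year_births : Prop := ∀ (input_lst : List (List Int)), Dom_year_births input_lst → Pre_year_births input_lst → Spec_year_births input_lst (year_births input_lst)

-- ===== LEMMAS AND PROOFS =====

-- ===== VERDICT (by name: the statement is the Claim_ definition above) =====
-- value of the accumulation fold at any key: old value plus the sum of matching rows
lemma getD_fold_insert_add {α : Type} (l : List α) (k v : α → Int)
    (d : PySem.Dict Int Int) (y : Int) :
    (l.foldl (fun d x => d.insert (k x) (d.getD (k x) 0 + v x)) d).getD y 0
      = d.getD y 0 + ((l.filter (fun x => k x == y)).map v).sum := by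
  induction l generalizing d with
  | nil => simp
  | cons x t ih =>
      simp only [List.foldl_cons, ih, List.filter_cons]
      by_cases hy : k x = y
      · simp [hy, PySem.Dict.getD_insert_self]; ring
      · simp [PySem.Dict.getD_insert_of_ne d _ _ (Ne.symm hy), hy]

-- under Pre_, A's step is the insert-accumulate step keyed by key0 with value val4
lemma yearStepA_eq (d : PySem.Dict Int Int) (item : List Int) (h : 5 ≤ item.length) :
    yearStepA d item = d.insert (key0 item) (d.getD (key0 item) 0 + val4 item) := by
  have hl0 : 0 < item.length := by omega
  have hl4 : 4 < item.length := by omega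
  have h0 : PySem.List.pyGet? item 0 = some (key0 item) := by
    simp [PySem.List.pyGet?, PySem.List.pyIdx?, key0, PySem.List.pyGetD, hl0]
  have h4 : PySem.List.pyGet? item 4 = some (val4 item) := by
    simp [PySem.List.pyGet?, PySem.List.pyIdx?, val4, PySem.List.pyGetD, hl4]
  simp only [yearStepA, h0, h4]
  by_cases hc : d.contains (key0 item) = false
  · simp [hc, PySem.Dict.getD_of_not_contains d 0 hc]
  · simp [hc]

theorem year_births_spec : Claim_equal_year_births := by
  intro input_lst _ hpre
  unfold Spec_year_births year_births year_births_alt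
  have hstep : input_lst.foldl yearStepA PySem.Dict.empty
      = input_lst.foldl
          (fun d item => d.insert (key0 item) (d.getD (key0 item) 0 + val4 item))
          PySem.Dict.empty := by
    exact PySem.List.foldl_congr_mem input_lst _ _ _ (fun acc x hx => yearStepA_eq acc x (hpre x hx))
  rw [hstep]
  set F := input_lst.foldl
      (fun d item => d.insert (key0 item) (d.getD (key0 item) 0 + val4 item))
      PySem.Dict.empty with hF
  have hnd : F.keys.Nodup := by
    exact PySem.Dict.nodup_keys_foldl_insert_key input_lst key0 _ _
      PySem.Dict.nodup_keys_empty
  have hkeys : F.keys = PySem.List.dedup (input_lst.map key0) := by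
    rw [hF, PySem.Dict.keys_foldl_insert_key, PySem.List.dedup_eq_ofList]
    rfl
  rw [PySem.Dict.items_eq_map_keys F hnd 0, hkeys]
  refine List.map_congr_left (fun y hy => ?_)
  have := getD_fold_insert_add input_lst key0 val4 PySem.Dict.empty y
  rw [← hF] at this
  simp only [this, PySem.Dict.getD_empty, zero_add]
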